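-- pv_equiv track=rewrite | github.com/MrBrantCode/unitest_baseline | mut_generate/mist_train_cf/cf_21248/solution.py | fibonacci_calculations
-- ===== SOURCE A (Python) =====
-- def fibonacci_calculations(n):
--     """
--     Generates a Fibonacci sequence up to a given number n and returns the sum of the even numbers in the sequence and the product of the odd numbers in the sequence.
--
--     Args:
--         n (int): The upper limit of the Fibonacci sequence.
--
--     Returns:
--         tuple: A tuple containing the sum of the even numbers in the sequence and the product of the odd numbers in the sequence.
--     """
--     a, b = 0, 1
--     even_sum, odd_product = 0, 1
--
--     while a <= n:
--         if a % 2 == 0: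
--             even_sum += a
--         else:
--             odd_product *= a
--
--         a, b = b, a + b
--
--     return even_sum, odd_product
-- ===== SOURCE B (Python) =====
-- def fibonacci_calculations(n):
--     # Pass 1: generate the Fibonacci numbers up to n (0, 1, 1, 2, ...).
--     fibs = []
--     a, b = 0, 1
--     while a <= n:
--         fibs.append(a)
--         a, b = b, a + b
--     # Pass 2: sum of even members.
--     even_sum = sum(x for x in fibs if x % 2 == 0)
--     # Pass 3: product of odd members.
--     odd_product = 1
--     for x in fibs:
--         if x % 2 == 1:
--             odd_product *= x
--     return even_sum, odd_product
-- ===== Notes on version B (the rewrite author's own statement) =====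
-- stated objective: alternative
-- what changed: Replaces the single fused branching loop by three passes: generate the Fibonacci list once, then sum its even members and multiply its odd members in separate aggregation passes.
import Mathlib
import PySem

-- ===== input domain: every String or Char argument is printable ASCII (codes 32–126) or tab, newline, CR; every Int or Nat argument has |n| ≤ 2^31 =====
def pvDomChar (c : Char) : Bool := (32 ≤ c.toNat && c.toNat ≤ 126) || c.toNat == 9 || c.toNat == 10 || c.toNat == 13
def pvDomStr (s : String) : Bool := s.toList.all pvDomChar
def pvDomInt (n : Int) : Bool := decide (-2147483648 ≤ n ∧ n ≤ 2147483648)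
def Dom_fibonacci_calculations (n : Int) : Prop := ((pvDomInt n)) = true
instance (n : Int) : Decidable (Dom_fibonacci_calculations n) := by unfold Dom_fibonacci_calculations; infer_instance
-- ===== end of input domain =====

-- B splits A's fused branching while-loop into a generation pass plus two separate aggregation passes; same cost (objective: alternative).
-- Both while-loops are ported with fuel 100: Fibonacci numbers exceed 2^31 after 48 iterations, so on Dom (|n| ≤ 2^31) the fuel never runs out and the ports are exact.

-- ===== PORT A =====
-- A's while-loop: state (a, b, even_sum, odd_product), fused branch on parity.
def fibLoopA (fuel : Nat) (n a b even_sum odd_product : Int) : Int × Int :=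
  match fuel with
  | 0 => (even_sum, odd_product)
  | f + 1 =>
    if a ≤ n then
      if a % 2 = 0 then fibLoopA f n b (a + b) (even_sum + a) odd_product
      else fibLoopA f n b (a + b) even_sum (odd_product * a)
    else (even_sum, odd_product)

def fibonacci_calculations (n : Int) : Int × Int :=
  fibLoopA 100 n 0 1 0 1

-- ===== PORT B =====
-- Pass 1: generate the Fibonacci list up to n.
def fibGenB (fuel : Nat) (n a b : Int) : List Int :=
  match fuel with
  | 0 => []
  | f + 1 => if a ≤ n then a :: fibGenB f n b (a + b) else []

def fibonacci_calculations_alt (n : Int) : Int × Int :=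
  let fibs := fibGenB 100 n 0 1
  -- Pass 2: sum of even members (Python sum over a filtered generator).
  let even_sum := (fibs.filter (fun x => x % 2 = 0)).foldl (· + ·) 0
  -- Pass 3: product of odd members.
  let odd_product := (fibs.filter (fun x => x % 2 = 1)).foldl (· * ·) 1
  (even_sum, odd_product)

-- ===== PRECONDITION & SPEC =====
def Spec_fibonacci_calculations (n : Int) (out : Int × Int) : Prop := out = fibonacci_calculations_alt n
instance (n : Int) (out : Int × Int) : Decidable (Spec_fibonacci_calculations n out) := by unfold Spec_fibonacci_calculations; infer_instance

-- ===== CLAIM (what is proved, stated in full; the proofs are below) =====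
def Claim_equal_fibonacci_calculations : Prop := ∀ (n : Int), Dom_fibonacci_calculations n → Spec_fibonacci_calculations n (fibonacci_calculations n)

-- ===== LEMMAS AND PROOFS =====

theorem foldl_add_shift (l : List Int) (c : Int) : l.foldl (· + ·) c = c + l.foldl (· + ·) 0 := by
  induction l generalizing c with
  | nil => simp
  | cons x xs ih => simp only [List.foldl_cons]; rw [ih (c + x), ih (0 + x)]; ring

theorem foldl_mul_shift (l : List Int) (c : Int) : l.foldl (· * ·) c = c * l.foldl (· * ·) 1 := by
  induction l generalizing c with
  | nil => simp
  | cons x xs ih => simp only [List.foldl_cons]; rw [ih (c * x), ih (1 * x)]; ring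

-- The fused loop equals the pre-seeded aggregations over the generated list.
theorem fibLoopA_eq (fuel : Nat) (n a b es op : Int) :
    fibLoopA fuel n a b es op =
      (es + ((fibGenB fuel n a b).filter (fun x => x % 2 = 0)).foldl (· + ·) 0,
       op * ((fibGenB fuel n a b).filter (fun x => x % 2 = 1)).foldl (· * ·) 1) := by
  induction fuel generalizing a b es op with
  | zero => simp [fibLoopA, fibGenB]
  | succ f ih =>
    simp only [fibLoopA, fibGenB]
    by_cases hle : a ≤ n
    · simp only [hle, if_true]
      by_cases hpar : a % 2 = 0
      · have h1 : ¬ a % 2 = 1 := by omega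
        simp only [hpar, if_true, List.filter_cons, decide_eq_true_eq, List.foldl_cons, ih]
        rw [foldl_add_shift _ (0 + a)]
        norm_num [Prod.mk.injEq]
        ring
      · have h1 : a % 2 = 1 := by omega
        simp only [List.filter_cons, decide_eq_true_eq, h1, ite_true,
          List.foldl_cons, ih]
        rw [foldl_mul_shift _ (1 * a)]
        norm_num [Prod.mk.injEq]
        ring
    · simp [hle]

-- ===== VERDICT (by name: the statement is the Claim_ definition above) =====
theorem fibonacci_calculations_spec : Claim_equal_fibonacci_calculations := by
  intro n _
  show fibonacci_calculations n = fibonacci_calculations_alt n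
  simp [fibonacci_calculations, fibonacci_calculations_alt, fibLoopA_eq]
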